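-- pv_equiv track=rewrite | github.com/hmolhem/Data-Science | Python/Maktabkhone/python-advance/Chapter-01/myModule.py | detwld
-- ===== SOURCE A (Python) =====
-- def detwld(lgf, lga):
--     win, draw, lose = 0, 0, 0
--     for i,j in zip(lgf,lga):
--         if i>j:
--             win+=1
--         elif i==j:
--             draw+=1
--         else:
--             lose+=1
--     return win, draw, lose
-- ===== SOURCE B (Python) =====
-- def detwld(lgf, lga):
--     pairs = list(zip(lgf, lga))
--     win = sum(1 for i, j in pairs if i > j)
--     draw = sum(1 for i, j in pairs if i == j)
--     lose = sum(1 for i, j in pairs if not (i > j) and not (i == j))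
--     return win, draw, lose
-- ===== Notes on version B (the rewrite author's own statement) =====
-- stated objective: simpler
-- what changed: Replaced the single stateful loop with a three-way branch by three independent comprehension counts over the zipped pairs.
import Mathlib
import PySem

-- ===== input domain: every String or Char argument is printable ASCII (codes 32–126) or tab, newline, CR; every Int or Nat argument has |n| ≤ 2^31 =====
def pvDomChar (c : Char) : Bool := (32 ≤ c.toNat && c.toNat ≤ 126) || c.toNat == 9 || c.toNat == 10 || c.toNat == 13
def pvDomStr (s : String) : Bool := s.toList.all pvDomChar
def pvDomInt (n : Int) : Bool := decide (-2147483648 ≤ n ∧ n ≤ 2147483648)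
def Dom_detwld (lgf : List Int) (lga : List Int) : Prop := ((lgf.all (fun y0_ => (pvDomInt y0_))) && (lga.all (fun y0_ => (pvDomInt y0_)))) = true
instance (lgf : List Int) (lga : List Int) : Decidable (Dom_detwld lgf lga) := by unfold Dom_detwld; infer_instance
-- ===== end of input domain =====

-- B replaces the single stateful three-way-branch loop by three independent counts over the zipped pairs (simpler decomposition).


-- ===== PORT A =====
-- loop over zip with (win, draw, lose) state, branching per pair
def detwld (lgf : List Int) (lga : List Int) : Int × Int × Int :=
  (lgf.zip lga).foldl
    (fun (s : Int × Int × Int) (p : Int × Int) =>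
      if p.1 > p.2 then (s.1 + 1, s.2.1, s.2.2)
      else if p.1 = p.2 then (s.1, s.2.1 + 1, s.2.2)
      else (s.1, s.2.1, s.2.2 + 1))
    (0, 0, 0)

-- ===== PORT B =====
-- three independent counts over the zipped pairs
def detwld_alt (lgf : List Int) (lga : List Int) : Int × Int × Int :=
  let pairs := lgf.zip lga
  let win : Int := (pairs.countP (fun p => p.1 > p.2) : Nat)
  let draw : Int := (pairs.countP (fun p => p.1 = p.2) : Nat)
  let lose : Int := (pairs.countP (fun p => !(p.1 > p.2) && !(p.1 = p.2)) : Nat)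
  (win, draw, lose)

-- ===== PRECONDITION & SPEC =====
def Spec_detwld (lgf : List Int) (lga : List Int) (out : Int × Int × Int) : Prop := out = detwld_alt lgf lga
instance (lgf : List Int) (lga : List Int) (out : Int × Int × Int) : Decidable (Spec_detwld lgf lga out) := by unfold Spec_detwld; infer_instance

-- ===== CLAIM (what is proved, stated in full; the proofs are below) =====
def Claim_equal_detwld : Prop := ∀ (lgf : List Int) (lga : List Int), Dom_detwld lgf lga → Spec_detwld lgf lga (detwld lgf lga)

-- ===== LEMMAS AND PROOFS =====

-- A's loop starting from an arbitrary accumulator adds the three counts componentwise.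
theorem detwld_foldl_counts (l : List (Int × Int)) (a b c : Int) :
    l.foldl
      (fun (s : Int × Int × Int) (p : Int × Int) =>
        if p.1 > p.2 then (s.1 + 1, s.2.1, s.2.2)
        else if p.1 = p.2 then (s.1, s.2.1 + 1, s.2.2)
        else (s.1, s.2.1, s.2.2 + 1))
      (a, b, c)
    = (a + (l.countP (fun p => p.1 > p.2) : Nat),
       b + (l.countP (fun p => p.1 = p.2) : Nat),
       c + (l.countP (fun p => !(p.1 > p.2) && !(p.1 = p.2)) : Nat)) := by
  induction l generalizing a b c with
  | nil => simp
  | cons p t ih =>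
    by_cases h1 : p.1 > p.2
    · simp [List.foldl, List.countP_cons, h1, ih]
      constructor
      · ring
      · simp [ne_of_gt h1]
    · by_cases h2 : p.1 = p.2
      · simp [List.foldl, h2, ih]
        ring
      · simp [List.foldl, h1, h2, ih]
        ring

-- ===== VERDICT (by name: the statement is the Claim_ definition above) =====
theorem detwld_spec : Claim_equal_detwld := by
  intro lgf lga _
  unfold Spec_detwld detwld detwld_alt
  simp [detwld_foldl_counts]
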